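-- pv_equiv track=rewrite | github.com/emrearslandogan/homeworks | ceng111/the2/tester/tester/the2.py | rule5
-- ===== SOURCE A (Python) =====
-- def rule5(calendar, cost, final_errors): # Aunt 1
--     # finding a1's days
--     enumcalendar = enumerate(calendar)
--     a1days = list(filter(lambda x: x[1] == "a1", enumcalendar))
--     a1daysfinal = [t[0] for t in a1days]
--
--     # there is only one condition, she is only avaliable on tuesdays and fridays (% == 1 or % == 4)
--     temp = [t % 5 for t in a1daysfinal]
--
--     if (0 in temp) or (2 in temp) or (3 in temp):
--         final_errors.append(5)
--         return cost, final_errors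
--
--     else:
--         cost += len(a1daysfinal * 32)
--         return cost, final_errors
-- ===== SOURCE B (Python) =====
-- def rule5(calendar, cost, final_errors):  # Aunt 1
--     # single pass: count a1 days, bail out on the first one that falls on a forbidden weekday
--     count = 0
--     for i, day in enumerate(calendar):
--         if day == "a1":
--             if i % 5 in (0, 2, 3):
--                 final_errors.append(5)
--                 return cost, final_errors
--             count += 1
--     cost += 32 * count
--     return cost, final_errors
-- ===== Notes on version B (the rewrite author's own statement) =====
-- stated objective: simpler
-- what changed: Replaces A's four separate passes (enumerate+filter, index projection, mod mapping, three membership scans) by one loop over enumerate(calendar) that counts a1 days and returns early on the first forbidden-weekday hit; cost += 32*count replaces len(a1daysfinal*32), which builds a 32-fold copy of the list just to take its length.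
import Mathlib
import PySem

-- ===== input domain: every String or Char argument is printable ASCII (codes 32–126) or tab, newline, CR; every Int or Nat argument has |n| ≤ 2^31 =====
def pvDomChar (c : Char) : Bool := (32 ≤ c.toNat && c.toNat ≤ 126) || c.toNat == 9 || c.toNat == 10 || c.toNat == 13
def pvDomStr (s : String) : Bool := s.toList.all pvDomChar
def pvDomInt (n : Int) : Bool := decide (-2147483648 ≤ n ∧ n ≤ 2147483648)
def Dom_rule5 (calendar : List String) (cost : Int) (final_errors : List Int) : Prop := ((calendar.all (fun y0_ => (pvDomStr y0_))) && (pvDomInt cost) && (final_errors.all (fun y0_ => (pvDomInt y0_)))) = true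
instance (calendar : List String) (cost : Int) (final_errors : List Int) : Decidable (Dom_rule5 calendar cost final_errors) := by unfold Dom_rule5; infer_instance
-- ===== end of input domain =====

-- B fuses A's filter/projection/mod-map/membership passes into one counting loop with early
-- exit (objective: simpler). Both versions append 5 to final_errors in place on the error
-- branch; the equivalence proved here is about the RETURN value (which includes that list).

-- ===== PORT A =====
def rule5 (calendar : List String) (cost : Int) (final_errors : List Int) : Int × List Int :=
  let enumcalendar := PySem.List.enumerate calendar
  let a1days := enumcalendar.filter (fun x => x.2 == "a1")
  let a1daysfinal := a1days.map (fun t => t.1)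
  let temp := a1daysfinal.map (fun t => PySem.Int.mod t 5)
  if temp.contains 0 || temp.contains 2 || temp.contains 3 then
    (cost, final_errors ++ [5])
  else
    -- len(a1daysfinal * 32): Python list repetition, then its length
    (cost + (((List.replicate 32 a1daysfinal).flatten).length : Int), final_errors)

-- ===== PORT B =====
def rule5AltLoop : List (Int × String) → Int → List Int → Int → Int × List Int
  | [], cost, fe, count => (cost + 32 * count, fe)
  | (i, day) :: rest, cost, fe, count =>
    if day == "a1" then
      if PySem.Int.mod i 5 == 0 || PySem.Int.mod i 5 == 2 || PySem.Int.mod i 5 == 3 then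
        (cost, fe ++ [5])
      else rule5AltLoop rest cost fe (count + 1)
    else rule5AltLoop rest cost fe count

def rule5_alt (calendar : List String) (cost : Int) (final_errors : List Int) : Int × List Int :=
  rule5AltLoop (PySem.List.enumerate calendar) cost final_errors 0

-- ===== PRECONDITION & SPEC =====
def Spec_rule5 (calendar : List String) (cost : Int) (final_errors : List Int) (out : Int × List Int) : Prop := out = rule5_alt calendar cost final_errors
instance (calendar : List String) (cost : Int) (final_errors : List Int) (out : Int × List Int) : Decidable (Spec_rule5 calendar cost final_errors out) := by unfold Spec_rule5; infer_instance

-- ===== CLAIM (what is proved, stated in full; the proofs are below) =====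
def Claim_equal_rule5 : Prop := ∀ (calendar : List String) (cost : Int) (final_errors : List Int), Dom_rule5 calendar cost final_errors → Spec_rule5 calendar cost final_errors (rule5 calendar cost final_errors)

-- ===== LEMMAS AND PROOFS =====

/-- B's loop, characterised by A's filter/map passes over any index-string list. -/
lemma rule5AltLoop_eq (l : List (Int × String)) :
    ∀ (cost : Int) (fe : List Int) (count : Int),
    rule5AltLoop l cost fe count =
      (let temp := (l.filter (fun x => x.2 == "a1")).map (fun t => PySem.Int.mod t.1 5)
       if temp.contains 0 || temp.contains 2 || temp.contains 3 then
         (cost, fe ++ [5])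
       else
         (cost + 32 * (count + ((l.filter (fun x => x.2 == "a1")).length : Int)), fe)) := by
  induction l with
  | nil => intro cost fe count; simp [rule5AltLoop]
  | cons hd tl ih =>
    intro cost fe count
    obtain ⟨i, day⟩ := hd
    by_cases hday : day = "a1"
    · subst hday
      have hfil : List.filter (fun x => x.2 == "a1") ((i, "a1") :: tl)
          = (i, "a1") :: List.filter (fun x => x.2 == "a1") tl := by
        simp
      simp only [rule5AltLoop, beq_self_eq_true, if_true, hfil, List.map_cons,
        List.contains_cons, List.length_cons]
      generalize PySem.Int.mod i 5 = m
      by_cases h0 : m = 0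
      · simp [h0]
      · by_cases h2 : m = 2
        · simp [h2]
        · by_cases h3 : m = 3
          · simp [h3]
          · have e : ((m == 0 || m == 2) || m == 3) = false := by
              simp [h0, h2, h3]
            have e0 : ((0 : Int) == m) = false := by simp; exact fun h => h0 h.symm
            have e2 : ((2 : Int) == m) = false := by simp; exact fun h => h2 h.symm
            have e3 : ((3 : Int) == m) = false := by simp; exact fun h => h3 h.symm
            simp only [e, Bool.false_eq_true, if_false, e0, e2, e3, Bool.false_or]
            rw [ih]
            dsimp only
            split
            · rfl
            · congr 1
              push_cast
              ring
    · have hne : (day == "a1") = false := by simp [hday]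
      have hfil : List.filter (fun x => x.2 == "a1") ((i, day) :: tl)
          = List.filter (fun x => x.2 == "a1") tl := by
        simp [hne]
      simp only [rule5AltLoop, hne, Bool.false_eq_true, if_false, hfil]
      rw [ih]

-- ===== VERDICT (by name: the statement is the Claim_ definition above) =====
theorem rule5_spec : Claim_equal_rule5 := by
  intro calendar cost final_errors _
  unfold Spec_rule5 rule5 rule5_alt
  rw [rule5AltLoop_eq]
  dsimp only
  simp only [List.map_map, Function.comp_def]
  split
  · rfl
  · congr 1
    simp only [List.length_flatten, List.map_replicate, List.length_map,
      List.sum_replicate, smul_eq_mul]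
    push_cast
    ring
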